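-- pv_equiv track=rewrite | github.com/danedyy/wnba-ml-project | data_utils.py | normalize_award_name
-- ===== SOURCE A (Python) =====
-- def normalize_award_name(award_name):
--     # List of standard award names
--     standard_awards = [
--         'all-star game most valuable player', 'coach of the year', 'defensive player of the year',
--         'kim perrot sportsmanship award', 'most improved player', 'most valuable player',
--         'rookie of the year', 'sixth woman of the year', 'wnba all decade team honorable mention',
--         'wnba all-decade team', 'wnba finals most valuable player'
--     ]
--     award_name = award_name.lower().replace(' awards', ' award').strip()
--     # Check in the standard awards list if there is any exact match
--     for standard_award in standard_awards:
--         if award_name == standard_award: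
--             return award_name
--     else:
--         # Search for a similar award name in the standard awards list
--         for standard_award in standard_awards:
--             if award_name in standard_award:
--                 return standard_award
-- ===== SOURCE B (Python) =====
-- def normalize_award_name(award_name):
--     standard_awards = [
--         'all-star game most valuable player', 'coach of the year', 'defensive player of the year',
--         'kim perrot sportsmanship award', 'most improved player', 'most valuable player',
--         'rookie of the year', 'sixth woman of the year', 'wnba all decade team honorable mention',
--         'wnba all-decade team', 'wnba finals most valuable player'
--     ]
--     name = award_name.lower().replace(' awards', ' award').strip()
--     candidate = None
--     for standard_award in standard_awards:
--         if name == standard_award: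
--             return standard_award
--         if candidate is None and name in standard_award:
--             candidate = standard_award
--     return candidate
-- ===== Notes on version B (the rewrite author's own statement) =====
-- stated objective: simpler
-- what changed: Replaces A's two sequential scans of the standard-award list (exact-match scan, then substring-match scan) with a single pass that returns immediately on an exact match and remembers the first substring match in a candidate variable returned after the loop.
import Mathlib
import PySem

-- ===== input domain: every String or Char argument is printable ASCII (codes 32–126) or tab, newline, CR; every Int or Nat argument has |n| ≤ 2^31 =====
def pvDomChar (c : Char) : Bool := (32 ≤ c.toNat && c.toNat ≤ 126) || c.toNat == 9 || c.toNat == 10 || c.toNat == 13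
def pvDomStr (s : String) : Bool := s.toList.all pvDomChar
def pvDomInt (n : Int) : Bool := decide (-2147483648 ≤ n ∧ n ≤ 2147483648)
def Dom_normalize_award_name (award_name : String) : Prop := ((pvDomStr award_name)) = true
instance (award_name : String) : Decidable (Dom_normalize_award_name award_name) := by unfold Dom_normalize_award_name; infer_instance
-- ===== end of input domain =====

-- B replaces A's two sequential scans of the award list with one pass that returns on an
-- exact match and remembers the first substring match as a candidate (objective: simpler).

-- ===== PORT A =====
def pvStandardAwards : List String := [
  "all-star game most valuable player", "coach of the year", "defensive player of the year",
  "kim perrot sportsmanship award", "most improved player", "most valuable player",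
  "rookie of the year", "sixth woman of the year", "wnba all decade team honorable mention",
  "wnba all-decade team", "wnba finals most valuable player"]

-- first loop of A: exact match, returns award_name itself
def pvExactA (x : String) : List String → Option String
  | [] => none
  | e :: t => if x == e then some x else pvExactA x t

-- second loop of A: first standard entry containing award_name ('award_name in standard_award')
def pvSubA (x : String) : List String → Option String
  | [] => none
  | e :: t => if PySem.Str.isIn x e then some e else pvSubA x t

def normalize_award_name (award_name : String) : Option String :=
  let n := PySem.Str.strip (PySem.Str.replace (PySem.Str.lower award_name) " awards" " award")
  match pvExactA n pvStandardAwards with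
  | some r => some r
  | none => pvSubA n pvStandardAwards

-- ===== PORT B =====
-- single pass: return the entry on exact match, otherwise remember the first substring match
def pvLoopB (x : String) : List String → Option String → Option String
  | [], c => c
  | e :: t, c =>
      if x == e then some e
      else pvLoopB x t (if c.isNone && PySem.Str.isIn x e then some e else c)

def normalize_award_name_alt (award_name : String) : Option String :=
  let n := PySem.Str.strip (PySem.Str.replace (PySem.Str.lower award_name) " awards" " award")
  pvLoopB n pvStandardAwards none

-- ===== PRECONDITION & SPEC =====
def Spec_normalize_award_name (award_name : String) (out : Option String) : Prop := out = normalize_award_name_alt award_name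
instance (award_name : String) (out : Option String) : Decidable (Spec_normalize_award_name award_name out) := by unfold Spec_normalize_award_name; infer_instance

-- ===== CLAIM (what is proved, stated in full; the proofs are below) =====
def Claim_equal_normalize_award_name : Prop := ∀ (award_name : String), Dom_normalize_award_name award_name → Spec_normalize_award_name award_name (normalize_award_name award_name)

-- ===== LEMMAS AND PROOFS =====

-- B's one-pass loop computes A's two-scan result, for any list and pending candidate
theorem pvLoopB_eq (x : String) (l : List String) (c : Option String) :
    pvLoopB x l c =
      match pvExactA x l with
      | some r => some r
      | none => match c with
                | some v => some v
                | none => pvSubA x l := by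
  induction l generalizing c with
  | nil => cases c <;> simp [pvLoopB, pvExactA, pvSubA]
  | cons e t ih =>
    by_cases h : x == e
    · have hx : x = e := eq_of_beq h
      simp [pvLoopB, pvExactA, h, hx]
    · simp only [pvLoopB, pvExactA, pvSubA, h, Bool.false_eq_true, ite_false, ih]
      cases c <;> cases hin : PySem.Str.isIn x e <;> simp

-- ===== VERDICT (by name: the statement is the Claim_ definition above) =====
theorem normalize_award_name_spec : Claim_equal_normalize_award_name := by
  intro award_name _
  unfold Spec_normalize_award_name normalize_award_name normalize_award_name_alt
  rw [pvLoopB_eq]
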